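-- pv_equiv track=rewrite | github.com/koii-network/prometheus-beta | src/mid_range_indices.py | find_mid_range_indices
-- ===== SOURCE A (Python) =====
-- def find_mid_range_indices(sorted_list, range_value):
--     """
--     Find indices of elements within a given range of the middle value in a sorted list.
--
--     Args:
--         sorted_list (list): A sorted list of integers
--         range_value (int): The range around the middle value to find indices for
--
--     Returns:
--         list: Indices of elements within the specified range of the middle value
--
--     Raises:
--         ValueError: If the input list is empty
--     """
--     if not sorted_list:
--         raise ValueError("Input list cannot be empty")
--
--     # Calculate the middle index
--     mid_index = len(sorted_list) // 2
--     mid_value = sorted_list[mid_index]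
--
--     # Find indices within the range
--     result_indices = []
--     for i, num in enumerate(sorted_list):
--         if abs(num - mid_value) <= range_value:
--             result_indices.append(i)
--
--     return result_indices
-- ===== SOURCE B (Python) =====
-- def find_mid_range_indices(sorted_list, range_value):
--     if not sorted_list:
--         raise ValueError("Input list cannot be empty")
--     mid_value = sorted_list[len(sorted_list) // 2]
--
--     def collect(lo, hi):
--         # indices i in [lo, hi) with sorted_list[i] within range_value of mid_value,
--         # by divide and conquer on the index interval
--         if hi - lo == 1:
--             return [lo] if abs(sorted_list[lo] - mid_value) <= range_value else []
--         if hi == lo: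
--             return []
--         m = (lo + hi) // 2
--         return collect(lo, m) + collect(m, hi)
--
--     return collect(0, len(sorted_list))
-- ===== Notes on version B (the rewrite author's own statement) =====
-- stated objective: alternative
-- what changed: B replaces A's single linear enumerate-and-append scan by a divide-and-conquer recursion on the index interval: it splits [lo, hi) at the midpoint, recursively collects matching indices in each half and concatenates, with the membership test only at singleton intervals.
import Mathlib
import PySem

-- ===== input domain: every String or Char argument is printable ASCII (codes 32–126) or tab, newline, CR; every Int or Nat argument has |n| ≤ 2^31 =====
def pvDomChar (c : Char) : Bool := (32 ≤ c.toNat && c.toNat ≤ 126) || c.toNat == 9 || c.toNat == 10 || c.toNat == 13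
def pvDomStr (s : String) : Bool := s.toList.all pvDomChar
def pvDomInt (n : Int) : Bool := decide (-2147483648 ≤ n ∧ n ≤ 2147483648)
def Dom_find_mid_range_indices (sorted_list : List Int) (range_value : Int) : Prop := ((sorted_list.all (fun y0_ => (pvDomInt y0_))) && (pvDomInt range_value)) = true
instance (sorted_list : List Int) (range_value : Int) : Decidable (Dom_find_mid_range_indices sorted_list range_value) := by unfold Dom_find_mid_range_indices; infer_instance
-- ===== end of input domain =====

-- B replaces A's linear enumerate-and-append scan by a divide-and-conquer recursion on the
-- index interval (split at the midpoint, recurse, concatenate); alternative decomposition, same O(n).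

-- ===== PORT A =====
def find_mid_range_indices (sorted_list : List Int) (range_value : Int) : List Int :=
  if sorted_list = [] then []  -- Python raises ValueError here; excluded by Pre_
  else
    let mid_index := PySem.Int.floordiv (sorted_list.length : Int) 2
    let mid_value := (PySem.List.pyGet? sorted_list mid_index).getD 0
    (PySem.List.enumerate sorted_list).foldl
      (fun acc p => if |p.2 - mid_value| ≤ range_value then acc ++ [p.1] else acc) []

-- ===== PORT B =====
-- collect(lo, hi): indices i in [lo, hi) whose element is within range_value of mid_value,
-- split at m = (lo+hi)//2 and recurse.  (a[lo] ported as a.getD lo 0: the singleton branch is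
-- only reached with lo < len(a); Python's 'hi == lo' test is 'hi ≤ lo' here for totality — the
-- recursion only ever calls it with lo ≤ hi.)
def pvCollect (a : List Int) (mv rv : Int) (lo hi : Nat) : List Int :=
  if hi - lo = 1 then
    if |a.getD lo 0 - mv| ≤ rv then [Int.ofNat lo] else []
  else if hi ≤ lo then []
  else
    pvCollect a mv rv lo ((lo + hi) / 2) ++ pvCollect a mv rv ((lo + hi) / 2) hi
termination_by hi - lo
decreasing_by all_goals omega

def find_mid_range_indices_alt (sorted_list : List Int) (range_value : Int) : List Int :=
  if sorted_list = [] then []  -- Python raises ValueError here; excluded by Pre_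
  else
    let mid_value := (PySem.List.pyGet? sorted_list (PySem.Int.floordiv (sorted_list.length : Int) 2)).getD 0
    pvCollect sorted_list mid_value range_value 0 sorted_list.length

-- ===== PRECONDITION & SPEC =====
-- Pre_ excludes only the empty list, on which Python A raises ValueError (and so does B).
def Pre_find_mid_range_indices (sorted_list : List Int) (range_value : Int) : Prop :=
  sorted_list ≠ []
instance (sorted_list : List Int) (range_value : Int) : Decidable (Pre_find_mid_range_indices sorted_list range_value) := by unfold Pre_find_mid_range_indices; infer_instance
def pvWitness_find_mid_range_indices : List Int × Int := ([0, 1, 2], 1)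
def Spec_find_mid_range_indices (sorted_list : List Int) (range_value : Int) (out : List Int) : Prop := out = find_mid_range_indices_alt sorted_list range_value
instance (sorted_list : List Int) (range_value : Int) (out : List Int) : Decidable (Spec_find_mid_range_indices sorted_list range_value out) := by unfold Spec_find_mid_range_indices; infer_instance

-- ===== CLAIM =====
def Claim_equal_find_mid_range_indices : Prop := ∀ (sorted_list : List Int) (range_value : Int), Dom_find_mid_range_indices sorted_list range_value → Pre_find_mid_range_indices sorted_list range_value → Spec_find_mid_range_indices sorted_list range_value (find_mid_range_indices sorted_list range_value)

-- ===== LEMMAS AND PROOFS =====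

-- the divide-and-conquer collector is the filtered contiguous index range
lemma pv_collect_eq (a : List Int) (mv rv : Int) (lo hi : Nat) (h : lo ≤ hi) :
    pvCollect a mv rv lo hi
      = ((List.range' lo (hi - lo)).filter
          (fun k => decide (|a.getD k 0 - mv| ≤ rv))).map Int.ofNat := by
  by_cases h1 : hi - lo = 1
  · rw [pvCollect, if_pos h1, h1]
    by_cases hp : |a.getD lo 0 - mv| ≤ rv <;>
      · simp only [List.getD] at hp
        simp [hp]
  · by_cases h2 : hi ≤ lo
    · rw [pvCollect, if_neg h1, if_pos h2]
      have h0 : hi - lo = 0 := by omega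
      simp [h0]
    · rw [pvCollect, if_neg h1, if_neg h2]
      have hlm : lo ≤ (lo + hi) / 2 := by omega
      have hmh : (lo + hi) / 2 ≤ hi := by omega
      rw [pv_collect_eq a mv rv lo ((lo + hi) / 2) hlm,
          pv_collect_eq a mv rv ((lo + hi) / 2) hi hmh]
      rw [← List.map_append, ← List.filter_append]
      have hsplit : List.range' lo ((lo + hi) / 2 - lo) ++ List.range' ((lo + hi) / 2) (hi - (lo + hi) / 2)
          = List.range' lo (hi - lo) := by
        have hr := List.range'_append_1 (s := lo) (m := (lo + hi) / 2 - lo) (n := hi - (lo + hi) / 2)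
        rw [show lo + ((lo + hi) / 2 - lo) = (lo + hi) / 2 from by omega] at hr
        rw [hr, show (lo + hi) / 2 - lo + (hi - (lo + hi) / 2) = hi - lo from by omega]
      rw [hsplit]
termination_by hi - lo
decreasing_by all_goals omega

lemma pv_main (sorted_list : List Int) (range_value : Int)
    (hne : sorted_list ≠ []) :
    find_mid_range_indices sorted_list range_value = find_mid_range_indices_alt sorted_list range_value := by
  unfold find_mid_range_indices find_mid_range_indices_alt
  dsimp only
  rw [if_neg hne, if_neg hne]
  set mv := (PySem.List.pyGet? sorted_list (PySem.Int.floordiv (sorted_list.length : Int) 2)).getD 0 with hmv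
  set n := sorted_list.length with hn
  -- A side: foldl over enumerate = filtered range of indices
  rw [PySem.List.enumerate_eq_map_pyRange sorted_list 0, List.foldl_map]
  rw [show (fun (acc : List Int) (j : Int) =>
        if |(j, PySem.List.pyGetD sorted_list j 0).2 - mv| ≤ range_value
        then acc ++ [(j, PySem.List.pyGetD sorted_list j 0).1] else acc)
      = (fun (acc : List Int) (j : Int) =>
        if (fun j => decide (|PySem.List.pyGetD sorted_list j 0 - mv| ≤ range_value)) j = true
        then acc ++ [id j] else acc) from by funext acc j; simp]
  rw [PySem.List.foldl_append_if]
  simp only [List.nil_append, List.map_id]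
  -- turn the Int range into a mapped Nat range
  have hpr : PySem.List.pyRange 0 (PySem.List.len sorted_list) 1
      = (List.range n).map Int.ofNat := by
    rw [PySem.List.pyRange_one]
    have hc : ((PySem.List.len sorted_list) - 0).toNat = n := by
      simp [PySem.List.len_eq, ← hn]
    rw [hc]
    apply List.map_congr_left
    intro k _
    simp [Int.ofNat_eq_natCast]
  rw [hpr, List.filter_map]
  -- B side: the collector is the same filtered range
  rw [pv_collect_eq sorted_list mv range_value 0 n (Nat.zero_le n)]
  rw [Nat.sub_zero, ← List.range_eq_range']
  congr 1
  apply List.filter_congr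
  intro k _
  simp only [Function.comp_apply, Int.ofNat_eq_natCast, PySem.List.pyGetD_natCast]

-- ===== VERDICT =====
theorem find_mid_range_indices_spec : Claim_equal_find_mid_range_indices := by
  intro sorted_list range_value _ hpre
  unfold Spec_find_mid_range_indices
  exact pv_main sorted_list range_value hpre
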